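-- pv_equiv track=rewrite | github.com/PeppaFan666/PIB-Bio-Helper | sex_linked.py | internal_print_chances
-- ===== SOURCE A (Python) =====
-- def internal_print_chances(arr):
--   male_rec =0
--   male_dom =0
--   female_rec =0
--   female_dom = 0
--   for i in arr:
--     if i[0].isupper():
--       if i[1] == "y":
--         male_dom+=1
--       else:
--         female_dom +=1
--     else:
--       if i[1] == "y":
--         male_rec += 1
--       else:
--         female_rec +=1
--   return [female_dom,female_rec,male_dom,male_rec]
-- ===== SOURCE B (Python) =====
-- def internal_print_chances(arr):
--   female_dom = sum(1 for i in arr if i[0].isupper() and i[1] != "y")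
--   female_rec = sum(1 for i in arr if not i[0].isupper() and i[1] != "y")
--   male_dom = sum(1 for i in arr if i[0].isupper() and i[1] == "y")
--   male_rec = sum(1 for i in arr if not i[0].isupper() and i[1] == "y")
--   return [female_dom, female_rec, male_dom, male_rec]
-- ===== Notes on version B (the rewrite author's own statement) =====
-- stated objective: alternative
-- what changed: Replaces the single loop dispatching into four mutable counters with four independent counting passes, one whole-array comprehension per returned category.
import Mathlib
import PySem

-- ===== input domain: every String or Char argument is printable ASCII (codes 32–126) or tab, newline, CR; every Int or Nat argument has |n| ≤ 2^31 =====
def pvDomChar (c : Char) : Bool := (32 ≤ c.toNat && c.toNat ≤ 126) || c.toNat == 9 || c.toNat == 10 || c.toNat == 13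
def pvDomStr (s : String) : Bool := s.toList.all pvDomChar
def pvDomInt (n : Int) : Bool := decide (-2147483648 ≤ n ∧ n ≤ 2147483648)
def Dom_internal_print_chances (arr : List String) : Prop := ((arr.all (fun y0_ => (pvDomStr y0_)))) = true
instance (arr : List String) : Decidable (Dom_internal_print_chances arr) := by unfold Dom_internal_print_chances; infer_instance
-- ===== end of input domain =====

-- B replaces A's single four-counter loop by four independent counting passes (same cost); Pre_ excludes inputs where both raise IndexError.


-- ===== PORT A =====
-- i[0] / i[1] of a genotype string (shared transliteration of the subscripts)
def pvFst (i : String) : Option Char := PySem.List.pyGet? i.toList 0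
def pvSnd (i : String) : Option Char := PySem.List.pyGet? i.toList 1

-- state = (male_rec, male_dom, female_rec, female_dom); the `| _, _ => s` arm is dead inside Pre_ (Python raises IndexError there)
def internal_print_chances (arr : List String) : List Int :=
  let st := arr.foldl (fun (s : Int × Int × Int × Int) i =>
    let (male_rec, male_dom, female_rec, female_dom) := s
    match pvFst i, pvSnd i with
    | some c0, some c1 =>
      if PySem.Chars.isupper c0 then
        if c1 = 'y' then (male_rec, male_dom + 1, female_rec, female_dom)
        else (male_rec, male_dom, female_rec, female_dom + 1)
      else
        if c1 = 'y' then (male_rec + 1, male_dom, female_rec, female_dom)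
        else (male_rec, male_dom, female_rec + 1, female_dom)
    | _, _ => s) (0, 0, 0, 0)
  [st.2.2.2, st.2.2.1, st.2.1, st.1]

-- ===== PORT B =====
def internal_print_chances_alt (arr : List String) : List Int :=
  let female_dom : Int := arr.countP (fun i => ((pvFst i).any PySem.Chars.isupper) && !(pvSnd i == some 'y'))
  let female_rec : Int := arr.countP (fun i => !((pvFst i).any PySem.Chars.isupper) && !(pvSnd i == some 'y'))
  let male_dom : Int := arr.countP (fun i => ((pvFst i).any PySem.Chars.isupper) && (pvSnd i == some 'y'))
  let male_rec : Int := arr.countP (fun i => !((pvFst i).any PySem.Chars.isupper) && (pvSnd i == some 'y'))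
  [female_dom, female_rec, male_dom, male_rec]

-- ===== PRECONDITION & SPEC =====
-- Pre_ excludes strings shorter than 2 characters, on which A (and B) raise IndexError at i[0]/i[1].
def Pre_internal_print_chances (arr : List String) : Prop := ∀ s ∈ arr, 2 ≤ s.length
instance (arr : List String) : Decidable (Pre_internal_print_chances arr) := by unfold Pre_internal_print_chances; infer_instance
def pvWitness_internal_print_chances : List String := ["Xy", "ab", "Ab", "xy"]
def Spec_internal_print_chances (arr : List String) (out : List Int) : Prop := out = internal_print_chances_alt arr
instance (arr : List String) (out : List Int) : Decidable (Spec_internal_print_chances arr out) := by unfold Spec_internal_print_chances; infer_instance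

-- ===== CLAIM (what is proved, stated in full; the proofs are below) =====
def Claim_equal_internal_print_chances : Prop := ∀ (arr : List String), Dom_internal_print_chances arr → Pre_internal_print_chances arr → Spec_internal_print_chances arr (internal_print_chances arr)

-- ===== LEMMAS AND PROOFS =====
theorem ipc_foldl (arr : List String) (h : ∀ s ∈ arr, 2 ≤ s.length)
    (a b c d : Int) :
    arr.foldl (fun (s : Int × Int × Int × Int) i =>
      let (male_rec, male_dom, female_rec, female_dom) := s
      match pvFst i, pvSnd i with
      | some c0, some c1 =>
        if PySem.Chars.isupper c0 then
          if c1 = 'y' then (male_rec, male_dom + 1, female_rec, female_dom)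
          else (male_rec, male_dom, female_rec, female_dom + 1)
        else
          if c1 = 'y' then (male_rec + 1, male_dom, female_rec, female_dom)
          else (male_rec, male_dom, female_rec + 1, female_dom)
      | _, _ => s) (a, b, c, d) =
    (a + arr.countP (fun i => !((pvFst i).any PySem.Chars.isupper) && (pvSnd i == some 'y')),
     b + arr.countP (fun i => ((pvFst i).any PySem.Chars.isupper) && (pvSnd i == some 'y')),
     c + arr.countP (fun i => !((pvFst i).any PySem.Chars.isupper) && !(pvSnd i == some 'y')),
     d + arr.countP (fun i => ((pvFst i).any PySem.Chars.isupper) && !(pvSnd i == some 'y'))) := by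
  induction arr generalizing a b c d with
  | nil => simp
  | cons s t ih =>
    have hs : 2 ≤ s.length := h s (List.mem_cons_self ..)
    obtain ⟨c0, h0⟩ : ∃ c0, pvFst s = some c0 := by
      rw [← Option.ne_none_iff_exists']
      simp [pvFst, PySem.List.pyGet?_eq_none_iff, PySem.Raise.InRange]
      intro h; simp [h] at hs
    obtain ⟨c1, h1⟩ : ∃ c1, pvSnd s = some c1 := by
      rw [← Option.ne_none_iff_exists']
      simp [pvSnd, PySem.List.pyGet?_eq_none_iff, PySem.Raise.InRange]
      omega
    have ht : ∀ u ∈ t, 2 ≤ u.length := fun u hu => h u (List.mem_cons_of_mem _ hu)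
    simp only [List.foldl_cons, List.countP_cons, h0, h1]
    rw [ih ht]
    by_cases hup : PySem.Chars.isupper c0 <;> by_cases hy : c1 = 'y' <;>
      simp [hup, hy] <;> ring_nf

-- ===== VERDICT (by name: the statement is the Claim_ definition above) =====
theorem internal_print_chances_spec : Claim_equal_internal_print_chances := by
  intro arr _ hpre
  unfold Spec_internal_print_chances internal_print_chances internal_print_chances_alt
  rw [ipc_foldl arr hpre]
  simp
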